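-- pv_equiv track=rewrite | github.com/Cnfc19932/Bron-Kerbosch-algorithm | test.py | MatrixMade
-- ===== SOURCE A (Python) =====
-- def MatrixMade(n):
--     matrix=[]
--     for i in range(n):
--         matrix.append([])
--         for j in range(n):
--             if (i==j):
--                 matrix[i]+=[(0)];
--             else: matrix[i]+=[(-999999999)]
--     return matrix
-- ===== SOURCE B (Python) =====
-- def MatrixMade(n):
--     # Incremental bordering: grow the k x k matrix into (k+1) x (k+1) by
--     # extending every existing row with one sentinel column and appending
--     # the new bottom row, which ends in its diagonal 0. No cell is ever
--     # computed by comparing indices.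
--     matrix = []
--     for k in range(n):
--         for row in matrix:
--             row.append(-999999999)
--         matrix.append([-999999999] * k + [0])
--     return matrix
-- ===== Notes on version B (the rewrite author's own statement) =====
-- stated objective: alternative
-- what changed: Replaces the per-cell diagonal test inside nested index loops by incremental bordering: the matrix is grown one order at a time, each step extending every existing row by one sentinel column and appending a new bottom row [-999999999]*k+[0], so no cell is produced by an i==j comparison.
import Mathlib
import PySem

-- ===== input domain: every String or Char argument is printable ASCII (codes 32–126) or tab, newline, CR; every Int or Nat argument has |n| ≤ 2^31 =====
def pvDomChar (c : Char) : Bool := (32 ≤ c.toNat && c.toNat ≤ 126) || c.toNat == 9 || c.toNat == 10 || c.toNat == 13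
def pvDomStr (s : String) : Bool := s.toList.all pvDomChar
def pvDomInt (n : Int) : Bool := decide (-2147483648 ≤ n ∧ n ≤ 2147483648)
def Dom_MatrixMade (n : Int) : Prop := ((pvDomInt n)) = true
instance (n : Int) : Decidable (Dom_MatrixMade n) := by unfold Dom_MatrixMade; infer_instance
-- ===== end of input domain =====

-- B builds the matrix by incremental bordering (grow the k×k matrix to (k+1)×(k+1) each step)
-- instead of a per-cell diagonal test (objective: alternative).

-- ===== PORT A =====
-- Port of A: nested loops; the inner loop does matrix[i] += [cell] via get/set at index i.
def MatrixMade (n : Int) : List (List Int) :=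
  (PySem.List.pyRange 0 n 1).foldl (fun matrix i =>
    let matrix := matrix ++ [([] : List Int)]
    (PySem.List.pyRange 0 n 1).foldl (fun m j =>
      PySem.List.pySetD m i
        (PySem.List.pyGetD m i [] ++ [if i = j then (0 : Int) else -999999999])) matrix) []

-- ===== PORT B =====
-- Port of B: at step k, append one sentinel to every existing row, then append the new
-- bottom row [-999999999]*k + [0] (Python list repetition by k ≥ 0 = replicate k.toNat).
def MatrixMade_alt (n : Int) : List (List Int) :=
  (PySem.List.pyRange 0 n 1).foldl (fun matrix k =>
    (matrix.map (fun row => row ++ [(-999999999 : Int)])) ++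
      [List.replicate k.toNat (-999999999 : Int) ++ [(0 : Int)]]) []

-- ===== PRECONDITION & SPEC =====
def Spec_MatrixMade (n : Int) (out : List (List Int)) : Prop := out = MatrixMade_alt n
instance (n : Int) (out : List (List Int)) : Decidable (Spec_MatrixMade n out) := by unfold Spec_MatrixMade; infer_instance

-- ===== CLAIM (what is proved, stated in full; the proofs are below) =====
def Claim_equal_MatrixMade : Prop := ∀ (n : Int), Dom_MatrixMade n → Spec_MatrixMade n (MatrixMade n)

-- ===== LEMMAS AND PROOFS =====

-- the common closed form both ports are proved equal to: row i of an M×M matrix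
def pvRow (M : Nat) (i : Nat) : List Int :=
  (List.range M).map (fun j : Nat => if (i : Int) = (j : Int) then (0 : Int) else -999999999)

lemma pvRange0 (n : Int) :
    PySem.List.pyRange 0 n 1 = (List.range n.toNat).map (fun k : Nat => (k:Int)) := by
  rw [PySem.List.pyRange_one]; simp [List.map_eq_flatMap]

lemma pvSetConcat {α : Type} (l : List α) (r v : α) : (l ++ [r]).set l.length v = l ++ [v] := by
  induction l with
  | nil => simp
  | cons a t ih => simp [ih]

lemma pvGetDConcat {α : Type} (l : List α) (r d : α) : (l ++ [r]).getD l.length d = r := by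
  simp [List.getD]

-- A's inner loop: repeatedly appending one cell to the last row
lemma pvInner (js : List Int) (f : Int → Int) (idx : Nat) (pre : List (List Int)) (row : List Int)
    (h : idx = pre.length) :
    js.foldl (fun m j => m.set idx (m.getD idx [] ++ [f j])) (pre ++ [row])
      = pre ++ [row ++ js.map f] := by
  subst h
  induction js generalizing row with
  | nil => simp
  | cons j js ih =>
    simp only [List.foldl_cons, pvGetDConcat, pvSetConcat, List.map_cons]
    rw [ih]; simp

-- A's outer loop builds the rows left to right
lemma pvOuterA (M N : Nat) :
    (List.range N).foldl
      (fun (matrix : List (List Int)) (k : Nat) =>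
        (((List.range M).map (fun j : Nat => (j:Int))).foldl
          (fun m j => PySem.List.pySetD m (k:Int)
            (PySem.List.pyGetD m (k:Int) [] ++ [if (k:Int) = j then (0:Int) else -999999999]))
          (matrix ++ [([] : List Int)])))
      []
    = (List.range N).map (pvRow M) := by
  induction N with
  | zero => simp
  | succ N ih =>
    rw [List.range_succ, List.foldl_append, ih]
    simp only [List.foldl_cons, List.foldl_nil, PySem.List.pySetD_natCast, PySem.List.pyGetD_natCast]
    rw [pvInner _ (fun j => if (N:Int) = j then (0:Int) else -999999999) N _ [] (by simp)]
    simp [pvRow, Function.comp]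

lemma pvA_eq (n : Int) : MatrixMade n = (List.range n.toNat).map (pvRow n.toNat) := by
  unfold MatrixMade
  rw [pvRange0, List.foldl_map]
  exact pvOuterA n.toNat n.toNat

-- extending a row of the k×k matrix by one sentinel gives the matching row of the (k+1)×(k+1) one
lemma pvRow_succ (N i : Nat) (hi : i < N) :
    pvRow N i ++ [(-999999999 : Int)] = pvRow (N + 1) i := by
  unfold pvRow
  rw [List.range_succ, List.map_append]
  simp only [List.map_cons, List.map_nil]
  congr 1
  simp only [List.cons.injEq, and_true]
  rw [if_neg]
  exact fun h => absurd (Int.natCast_inj.mp h) (Nat.ne_of_lt hi)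

-- the new bottom row is the last row of the (k+1)×(k+1) matrix
lemma pvRow_last (N : Nat) :
    List.replicate N (-999999999 : Int) ++ [(0 : Int)] = pvRow (N + 1) N := by
  unfold pvRow
  rw [List.range_succ, List.map_append]
  simp only [List.map_cons, List.map_nil]
  congr 1
  apply List.ext_getElem (by simp)
  intro j h1 h2
  simp only [List.getElem_replicate, List.getElem_map, List.getElem_range]
  rw [if_neg]
  intro h
  have := Int.natCast_inj.mp h
  simp at h1
  omega

-- B's bordering loop: after N steps the matrix is the full N×N matrix
lemma pvOuterB (N : Nat) :
    (List.range N).foldl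
      (fun (matrix : List (List Int)) (k : Nat) =>
        (matrix.map (fun row => row ++ [(-999999999 : Int)])) ++
          [List.replicate k (-999999999 : Int) ++ [(0 : Int)]])
      []
    = (List.range N).map (pvRow N) := by
  induction N with
  | zero => simp
  | succ N ih =>
    rw [List.range_succ, List.foldl_append, ih]
    simp only [List.foldl_cons, List.foldl_nil, List.map_map]
    rw [List.map_append]
    congr 1
    · apply List.map_congr_left
      intro i hi
      exact pvRow_succ N i (List.mem_range.mp hi)
    · simp [pvRow_last N]

lemma pvB_eq (n : Int) : MatrixMade_alt n = (List.range n.toNat).map (pvRow n.toNat) := by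
  unfold MatrixMade_alt
  rw [pvRange0, List.foldl_map]
  simp only [Int.toNat_natCast]
  exact pvOuterB n.toNat

-- ===== VERDICT (by name: the statement is the Claim_ definition above) =====
theorem MatrixMade_spec : Claim_equal_MatrixMade := by
  intro n _
  unfold Spec_MatrixMade
  rw [pvA_eq, pvB_eq]
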